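-- pv_equiv track=rewrite | github.com/sky2002/astrbot_plugin_arcaea_banner | services/metrics/arc.py | next_grade_gap
-- ===== SOURCE A (Python) =====
-- def next_grade_gap(score: int) -> tuple[str | None, int]:
--     milestones = [
--         ("AA", 9_500_000),
--         ("EX", 9_800_000),
--         ("EX+", 9_900_000),
--         ("PM", 10_000_000),
--     ]
--     for label, target in milestones:
--         if score < target:
--             return label, target - score
--     return None, 0
-- ===== SOURCE B (Python) =====
-- TARGETS = [9_500_000, 9_800_000, 9_900_000, 10_000_000]
-- LABELS = ["AA", "EX", "EX+", "PM"]
--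
--
-- def _bisect_right(a, x):
--     lo, hi = 0, len(a)
--     while lo < hi:
--         mid = (lo + hi) // 2
--         if x < a[mid]:
--             hi = mid
--         else:
--             lo = mid + 1
--     return lo
--
--
-- def next_grade_gap(score: int) -> tuple[str | None, int]:
--     i = _bisect_right(TARGETS, score)
--     if i == len(TARGETS):
--         return None, 0
--     return LABELS[i], TARGETS[i] - score
-- ===== Notes on version B (the rewrite author's own statement) =====
-- stated objective: alternative
-- what changed: Replaces the linear scan of (label,target) pairs with a binary search (hand-written bisect_right) over a parallel targets list, then an index lookup into the labels list.
import Mathlib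
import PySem

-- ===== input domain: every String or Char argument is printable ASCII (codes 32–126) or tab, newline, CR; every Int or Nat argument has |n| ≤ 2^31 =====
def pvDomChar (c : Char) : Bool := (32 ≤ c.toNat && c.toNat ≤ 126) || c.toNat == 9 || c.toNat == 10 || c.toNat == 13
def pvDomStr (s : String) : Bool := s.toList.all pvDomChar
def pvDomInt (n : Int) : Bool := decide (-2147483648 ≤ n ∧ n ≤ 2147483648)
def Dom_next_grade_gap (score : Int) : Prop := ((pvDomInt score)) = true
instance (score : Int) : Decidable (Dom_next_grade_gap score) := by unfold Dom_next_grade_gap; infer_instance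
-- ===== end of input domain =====

-- B replaces A's linear scan of (label,target) pairs with a binary search over a parallel
-- targets list plus an index lookup into labels (alternative structure, same exact values).


-- ===== PORT A =====
-- literal transliteration: scan the milestone pairs, return at the first target with score < target
def pvMilestones : List (String × Int) :=
  [("AA", 9500000), ("EX", 9800000), ("EX+", 9900000), ("PM", 10000000)]

def pvScanA (score : Int) : List (String × Int) → Option String × Int
  | [] => (none, 0)
  | (label, target) :: rest =>
      if score < target then (some label, target - score) else pvScanA score rest

def next_grade_gap (score : Int) : Option String × Int :=
  pvScanA score pvMilestones

-- ===== PORT B =====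
def pvTargets : List Int := [9500000, 9800000, 9900000, 10000000]
def pvLabels : List String := ["AA", "EX", "EX+", "PM"]

-- hand-written bisect_right from Source B, step for step (while lo < hi; mid = (lo+hi)//2)
def pvBisectRight (a : List Int) (x : Int) (lo hi : Nat) : Nat :=
  if h : lo < hi then
    let mid := (lo + hi) / 2
    if x < a.getD mid 0 then pvBisectRight a x lo mid
    else pvBisectRight a x (mid + 1) hi
  else lo
termination_by hi - lo
decreasing_by all_goals omega

def next_grade_gap_alt (score : Int) : Option String × Int :=
  let i := pvBisectRight pvTargets score 0 pvTargets.length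
  if i = pvTargets.length then (none, 0)
  else (some (pvLabels.getD i ""), pvTargets.getD i 0 - score)

-- ===== PRECONDITION & SPEC =====
def Spec_next_grade_gap (score : Int) (out : Option String × Int) : Prop := out = next_grade_gap_alt score
instance (score : Int) (out : Option String × Int) : Decidable (Spec_next_grade_gap score out) := by unfold Spec_next_grade_gap; infer_instance

-- ===== CLAIM (what is proved, stated in full; the proofs are below) =====
def Claim_equal_next_grade_gap : Prop := ∀ (score : Int), Dom_next_grade_gap score → Spec_next_grade_gap score (next_grade_gap score)

-- ===== LEMMAS AND PROOFS =====

-- ===== VERDICT (by name: the statement is the Claim_ definition above) =====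
theorem next_grade_gap_spec : Claim_equal_next_grade_gap := by
  intro score _
  unfold Spec_next_grade_gap next_grade_gap next_grade_gap_alt
  by_cases h1 : score < 9500000
  · have h2 : score < 9800000 := by omega
    have h3 : score < 9900000 := by omega
    simp [pvScanA, pvMilestones, pvBisectRight, pvTargets, pvLabels, h1, h2, h3]
  · by_cases h2 : score < 9800000
    · have h3 : score < 9900000 := by omega
      simp [pvScanA, pvMilestones, pvBisectRight, pvTargets, pvLabels, h1, h2, h3]
    · by_cases h3 : score < 9900000
      · have h4 : score < 10000000 := by omega
        simp [pvScanA, pvMilestones, pvBisectRight, pvTargets, pvLabels, h1, h2, h3]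
      · by_cases h4 : score < 10000000
        · simp [pvScanA, pvMilestones, pvBisectRight, pvTargets, pvLabels, h1, h2, h3, h4]
        · simp [pvScanA, pvMilestones, pvBisectRight, pvTargets, h1, h2, h3, h4]
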